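-- pv_equiv track=rewrite | github.com/n7tms/AOC | AOC2018/18.py | next_state
-- ===== SOURCE A (Python) =====
-- def get_adjacent(x, y, grid):
--     directions = [(-1, -1), (-1, 0), (-1, 1), (0, -1), (0, 1), (1, -1), (1, 0), (1, 1)]
--     adjacent = []
--     for dx, dy in directions:
--         nx, ny = x + dx, y + dy
--         if 0 <= nx < len(grid) and 0 <= ny < len(grid[0]):
--             adjacent.append(grid[nx][ny])
--     return adjacent
--
-- def next_state(grid):
--     new_grid = [row[:] for row in grid]
--     for x in range(len(grid)):
--         for y in range(len(grid[0])):
--             adjacent = get_adjacent(x, y, grid)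
--             if grid[x][y] == ".":
--                 new_grid[x][y] = "|" if adjacent.count("|") >= 3 else "."
--             elif grid[x][y] == "|":
--                 new_grid[x][y] = "#" if adjacent.count("#") >= 3 else "|"
--             elif grid[x][y] == "#":
--                 new_grid[x][y] = "#" if "#" in adjacent and "|" in adjacent else "."
--     return new_grid
-- ===== SOURCE B (Python) =====
-- def next_state(grid):
--     if not grid:
--         return []
--     h = len(grid)
--     w = len(grid[0])
--     pipe_count = [[0] * w for _ in range(h)]
--     hash_count = [[0] * w for _ in range(h)]
--     # scatter: each tree/lumberyard cell adds 1 to every in-bounds neighbor's counter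
--     for x in range(h):
--         for y in range(w):
--             v = grid[x][y]
--             if v == "|" or v == "#":
--                 cnt = pipe_count if v == "|" else hash_count
--                 for nx in range(x - 1, x + 2):
--                     for ny in range(y - 1, y + 2):
--                         if (nx != x or ny != y) and 0 <= nx < h and 0 <= ny < w:
--                             cnt[nx][ny] += 1
--     new_grid = [row[:] for row in grid]
--     for x in range(h):
--         for y in range(w):
--             c = grid[x][y]
--             if c == ".":
--                 new_grid[x][y] = "|" if pipe_count[x][y] >= 3 else "."
--             elif c == "|":
--                 new_grid[x][y] = "#" if hash_count[x][y] >= 3 else "|"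
--             elif c == "#":
--                 new_grid[x][y] = "#" if hash_count[x][y] >= 1 and pipe_count[x][y] >= 1 else "."
--     return new_grid
-- ===== Notes on version B (the rewrite author's own statement) =====
-- stated objective: faster
-- what changed: Replaces the per-cell gather (build an adjacent list for every cell via get_adjacent and count it) by a two-pass scatter: a first pass adds each '|'/'#' cell into two integer neighbor-count grids, a second pass rewrites each cell from its two precomputed counts.
import Mathlib
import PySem

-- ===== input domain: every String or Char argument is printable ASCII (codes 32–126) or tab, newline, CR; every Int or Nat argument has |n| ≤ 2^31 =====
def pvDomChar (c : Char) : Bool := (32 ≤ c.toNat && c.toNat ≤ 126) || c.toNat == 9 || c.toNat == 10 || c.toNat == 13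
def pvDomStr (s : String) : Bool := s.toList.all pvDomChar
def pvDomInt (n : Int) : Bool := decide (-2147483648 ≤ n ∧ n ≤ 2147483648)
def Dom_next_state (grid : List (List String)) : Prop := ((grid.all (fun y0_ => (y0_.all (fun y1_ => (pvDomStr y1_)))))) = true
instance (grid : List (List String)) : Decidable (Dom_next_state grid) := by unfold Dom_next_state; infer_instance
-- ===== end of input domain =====

-- B replaces A's per-cell gather-and-count (adjacent list + .count per cell) with a scatter pass into two neighbor-count grids (measurably faster by a constant factor); A and B agree on every grid where no row is shorter than row 0 (elsewhere both raise IndexError).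
-- ===== PORT A =====
-- the `directions` list of get_adjacent
def pvDirs : List (Int × Int) := [(-1, -1), (-1, 0), (-1, 1), (0, -1), (0, 1), (1, -1), (1, 0), (1, 1)]

def get_adjacent (x y : Int) (grid : List (List String)) : List String :=
  pvDirs.foldl (fun adjacent d =>
    if 0 ≤ x + d.1 ∧ x + d.1 < (grid.length : Int) ∧ 0 ≤ y + d.2 ∧ y + d.2 < (((grid.headD []).length : Int)) then
      adjacent ++ [((grid.getD (x + d.1).toNat []).getD (y + d.2).toNat "")]
    else adjacent) []

-- new_grid[x][y] = v  (a no-op when x or y is out of range, as in the in-range Python use)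
def pvSet2 (ng : List (List String)) (x y : Nat) (v : String) : List (List String) :=
  ng.set x ((ng.getD x []).set y v)

def next_state (grid : List (List String)) : List (List String) :=
  (List.range grid.length).foldl (fun ng (x : Nat) =>
    (List.range (grid.headD []).length).foldl (fun ng (y : Nat) =>
      let adjacent := get_adjacent (x : Int) (y : Int) grid
      let c := (grid.getD x []).getD y ""
      if c = "." then pvSet2 ng x y (if 3 ≤ adjacent.count "|" then "|" else ".")
      else if c = "|" then pvSet2 ng x y (if 3 ≤ adjacent.count "#" then "#" else "|")
      else if c = "#" then pvSet2 ng x y (if "#" ∈ adjacent ∧ "|" ∈ adjacent then "#" else ".")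
      else ng) ng) grid

-- ===== PORT B =====
-- cnt[x][y] += 1
def pvBump (g : List (List Int)) (x y : Nat) : List (List Int) :=
  g.modify x (fun r => r.modify y (· + 1))

-- the two inner `for nx in range(x-1, x+2): for ny in range(y-1, y+2)` loops of Source B
def pvBumpNbrs (h w : Nat) (x y : Nat) (g : List (List Int)) : List (List Int) :=
  (PySem.List.pyRange ((x : Int) - 1) ((x : Int) + 2) 1).foldl (fun g nx =>
    (PySem.List.pyRange ((y : Int) - 1) ((y : Int) + 2) 1).foldl (fun g ny =>
      if (¬(nx = (x : Int) ∧ ny = (y : Int))) ∧ 0 ≤ nx ∧ nx < (h : Int) ∧ 0 ≤ ny ∧ ny < (w : Int) then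
        pvBump g nx.toNat ny.toNat
      else g) g) g

def next_state_alt (grid : List (List String)) : List (List String) :=
  if grid = [] then []
  else
    let h := grid.length
    let w := (grid.headD []).length
    let pq :=
      (List.range h).foldl (fun pq x =>
        (List.range w).foldl (fun (pq : List (List Int) × List (List Int)) y =>
          let v := (grid.getD x []).getD y ""
          if v = "|" then (pvBumpNbrs h w x y pq.1, pq.2)
          else if v = "#" then (pq.1, pvBumpNbrs h w x y pq.2)
          else pq) pq) (List.replicate h (List.replicate w (0 : Int)), List.replicate h (List.replicate w (0 : Int)))
    (List.range h).foldl (fun ng x =>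
      (List.range w).foldl (fun ng y =>
        let c := (grid.getD x []).getD y ""
        if c = "." then pvSet2 ng x y (if 3 ≤ (pq.1.getD x []).getD y 0 then "|" else ".")
        else if c = "|" then pvSet2 ng x y (if 3 ≤ (pq.2.getD x []).getD y 0 then "#" else "|")
        else if c = "#" then pvSet2 ng x y (if 1 ≤ (pq.2.getD x []).getD y 0 ∧ 1 ≤ (pq.1.getD x []).getD y 0 then "#" else ".")
        else ng) ng) grid

-- ===== PRECONDITION & SPEC =====
-- Pre_ excludes grids in which some row is shorter than row 0: there Python A raises IndexError (and so does B).
def Pre_next_state (grid : List (List String)) : Prop :=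
  ∀ row ∈ grid, (grid.headD []).length ≤ row.length
instance (grid : List (List String)) : Decidable (Pre_next_state grid) := by unfold Pre_next_state; infer_instance

def pvWitness_next_state : List (List String) := [[".", "|", "#"], ["|", "|", "."], ["#", ".", "."]]

def Spec_next_state (grid : List (List String)) (out : List (List String)) : Prop := out = next_state_alt grid
instance (grid : List (List String)) (out : List (List String)) : Decidable (Spec_next_state grid out) := by unfold Spec_next_state; infer_instance

-- ===== CLAIM (what is proved, stated in full; the proofs are below) =====
def Claim_equal_next_state : Prop := ∀ (grid : List (List String)), Dom_next_state grid → Pre_next_state grid → Spec_next_state grid (next_state grid)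

-- ===== LEMMAS AND PROOFS =====

-- value at cell (x, y), with the ports' defaults
def pvCell (grid : List (List String)) (x y : Nat) : String := (grid.getD x []).getD y ""

-- number of in-bounds neighbors of (a, b) holding value v (the quantity both ports compute)
def pvNbrCnt (grid : List (List String)) (v : String) (a b : Nat) : Nat :=
  pvDirs.countP (fun d =>
    decide (0 ≤ (a : Int) + d.1 ∧ (a : Int) + d.1 < (grid.length : Int) ∧
            0 ≤ (b : Int) + d.2 ∧ (b : Int) + d.2 < (((grid.headD []).length : Int)) ∧
            pvCell grid ((a : Int) + d.1).toNat ((b : Int) + d.2).toNat = v))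


-- value of a count grid at (a, b), with the ports' defaults
def pvRead (g : List (List Int)) (a b : Nat) : Int := (g.getD a []).getD b 0

-- g is an h × w rectangle
def pvShape (h w : Nat) (g : List (List Int)) : Prop := g.length = h ∧ ∀ r ∈ g, r.length = w

-- (x, y) and (a, b) are (Chebyshev-)adjacent distinct cells
def pvAdj (x y a b : Nat) : Bool :=
  (!(x = a && y = b)) && (x ≤ a + 1) && (a ≤ x + 1) && (y ≤ b + 1) && (b ≤ y + 1)

-- contribution of row x (columns < w) to the v-neighbor count of (a, b)
def pvRowCnt (grid : List (List String)) (v : String) (a b x w : Nat) : Nat :=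
  (List.range w).countP (fun y => decide (pvCell grid x y = v) && pvAdj x y a b)

-- contribution of rows < k
def pvTotCnt (grid : List (List String)) (v : String) (a b k w : Nat) : Nat :=
  ((List.range k).map (fun x => pvRowCnt grid v a b x w)).sum

-- B's first pass, as the port computes it
def pvScatter (grid : List (List String)) : List (List Int) × List (List Int) :=
  (List.range grid.length).foldl (fun pq x =>
    (List.range (grid.headD []).length).foldl (fun (pq : List (List Int) × List (List Int)) y =>
      let v := (grid.getD x []).getD y ""
      if v = "|" then (pvBumpNbrs grid.length (grid.headD []).length x y pq.1, pq.2)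
      else if v = "#" then (pq.1, pvBumpNbrs grid.length (grid.headD []).length x y pq.2)
      else pq) pq)
    (List.replicate grid.length (List.replicate (grid.headD []).length (0 : Int)),
     List.replicate grid.length (List.replicate (grid.headD []).length (0 : Int)))

-- the common shape of both second passes
def pvPass (grid : List (List String)) (w : Nat) (U : Nat → Nat → Option String) : List (List String) :=
  (List.range grid.length).foldl (fun ng x =>
    (List.range w).foldl (fun ng y =>
      match U x y with
      | some v => pvSet2 ng x y v
      | none => ng) ng) grid

-- A's per-cell decision
def pvUA (grid : List (List String)) (x y : Nat) : Option String :=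
  let c := pvCell grid x y
  if c = "." then some (if 3 ≤ (get_adjacent (x : Int) (y : Int) grid).count "|" then "|" else ".")
  else if c = "|" then some (if 3 ≤ (get_adjacent (x : Int) (y : Int) grid).count "#" then "#" else "|")
  else if c = "#" then some (if "#" ∈ get_adjacent (x : Int) (y : Int) grid ∧ "|" ∈ get_adjacent (x : Int) (y : Int) grid then "#" else ".")
  else none

-- B's per-cell decision
def pvUB (grid : List (List String)) (x y : Nat) : Option String :=
  let c := pvCell grid x y
  if c = "." then some (if 3 ≤ pvRead (pvScatter grid).1 x y then "|" else ".")
  else if c = "|" then some (if 3 ≤ pvRead (pvScatter grid).2 x y then "#" else "|")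
  else if c = "#" then some (if 1 ≤ pvRead (pvScatter grid).2 x y ∧ 1 ≤ pvRead (pvScatter grid).1 x y then "#" else ".")
  else none

lemma pvShape_bump (h w : Nat) (g : List (List Int)) (x y : Nat) (hg : pvShape h w g) :
    pvShape h w (pvBump g x y) := by
  obtain ⟨hlen, hrow⟩ := hg
  unfold pvBump
  refine ⟨by simp [hlen], ?_⟩
  intro r hr
  obtain ⟨j, hj, hval⟩ := List.mem_iff_getElem.1 hr
  rw [List.getElem_modify] at hval
  subst hval
  split
  · simp only [List.length_modify]
    exact hrow _ (List.getElem_mem _)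
  · exact hrow _ (List.getElem_mem _)

lemma pvRead_bump (h w : Nat) (g : List (List Int)) (x y a b : Nat) (hg : pvShape h w g)
    (hx : x < h) (hy : y < w) :
    pvRead (pvBump g x y) a b = if a = x ∧ b = y then pvRead g a b + 1 else pvRead g a b := by
  obtain ⟨hlen, hrow⟩ := hg
  have hxg : x < g.length := by omega
  have hrl : g[x].length = w := hrow _ (List.getElem_mem _)
  by_cases hax : a = x
  · subst hax
    by_cases hby : b = y
    · subst hby
      have hbg : b < g[a].length := by omega
      simp [pvRead, pvBump, List.getD_eq_getElem?_getD, hxg, hbg]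
    · simp [pvRead, pvBump, List.getD_eq_getElem?_getD, List.getElem?_modify, hxg, hby]
      cases hb' : g[a][b]? <;> simp <;> omega
  · simp [pvRead, pvBump, List.getD_eq_getElem?_getD, List.getElem?_modify, hax]
    cases ha' : g[a]? <;> simp [Ne.symm hax]

lemma pvRead_foldl_inner (h w : Nat) (a b : Nat) (M : List Int) (C : Int → Prop) [DecidablePred C]
    (nx : Int)
    (hC : ∀ ny, C ny → 0 ≤ nx ∧ nx < (h : Int) ∧ 0 ≤ ny ∧ ny < (w : Int))
    (ha : a < h) (hb : b < w) :
    M.Nodup → ∀ g : List (List Int), pvShape h w g →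
      pvShape h w (M.foldl (fun g ny => if C ny then pvBump g nx.toNat ny.toNat else g) g) ∧
      pvRead (M.foldl (fun g ny => if C ny then pvBump g nx.toNat ny.toNat else g) g) a b
        = pvRead g a b + (if (b : Int) ∈ M ∧ nx = (a : Int) ∧ C (b : Int) then 1 else 0) := by
  induction M with
  | nil => intro _ g hg; exact ⟨hg, by simp⟩
  | cons m M ih =>
    intro hM g hg
    have hmM : m ∉ M := by simp at hM; exact hM.1
    have hstep : pvShape h w (if C m then pvBump g nx.toNat m.toNat else g) := by
      split
      · exact pvShape_bump h w g _ _ hg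
      · exact hg
    obtain ⟨hsh, hread⟩ := ih hM.of_cons (if C m then pvBump g nx.toNat m.toNat else g) hstep
    simp only [List.foldl_cons]
    refine ⟨hsh, ?_⟩
    rw [hread]
    have hfirst : pvRead (if C m then pvBump g nx.toNat m.toNat else g) a b
        = pvRead g a b + (if m = (b : Int) ∧ nx = (a : Int) ∧ C m then 1 else 0) := by
      by_cases hCm : C m
      · obtain ⟨h1, h2, h3, h4⟩ := hC m hCm
        rw [if_pos hCm, pvRead_bump h w g nx.toNat m.toNat a b hg (by omega) (by omega)]
        split_ifs with hc1 hc2 hc2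
        · ring
        · exact absurd ⟨by omega, by omega, hCm⟩ hc2
        · obtain ⟨e1, e2, -⟩ := hc2
          exact absurd ⟨by omega, by omega⟩ hc1
        · ring
      · simp [hCm]
    rw [hfirst]
    by_cases hbm : (b : Int) = m
    · have hno : (b : Int) ∉ M := by rw [hbm]; exact hmM
      have e1 : (if m = (b : Int) ∧ nx = (a : Int) ∧ C m then (1:Int) else 0)
          = (if nx = (a : Int) ∧ C (b : Int) then 1 else 0) := by simp [← hbm]
      have e2 : (if (b : Int) ∈ M ∧ nx = (a : Int) ∧ C (b : Int) then (1:Int) else 0) = 0 := by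
        simp [hno]
      have e3 : (if (b : Int) ∈ m :: M ∧ nx = (a : Int) ∧ C (b : Int) then (1:Int) else 0)
          = (if nx = (a : Int) ∧ C (b : Int) then 1 else 0) := by
        simp [List.mem_cons, hbm]
      rw [e1, e2, e3]; ring
    · have e1 : (if m = (b : Int) ∧ nx = (a : Int) ∧ C m then (1:Int) else 0) = 0 := by
        rw [if_neg]
        rintro ⟨hh, -⟩; exact hbm hh.symm
      have e3 : (if (b : Int) ∈ m :: M ∧ nx = (a : Int) ∧ C (b : Int) then (1:Int) else 0)
          = (if (b : Int) ∈ M ∧ nx = (a : Int) ∧ C (b : Int) then 1 else 0) := by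
        simp [List.mem_cons, hbm]
      rw [e1, e3]; ring

lemma pvRead_foldl2 (h w : Nat) (a b : Nat) (L M : List Int) (C : Int → Int → Prop)
    [∀ nx ny, Decidable (C nx ny)] (hM : M.Nodup)
    (hC : ∀ nx ny, C nx ny → 0 ≤ nx ∧ nx < (h : Int) ∧ 0 ≤ ny ∧ ny < (w : Int))
    (ha : a < h) (hb : b < w) :
    L.Nodup → ∀ g : List (List Int), pvShape h w g →
      pvShape h w (L.foldl (fun g nx => M.foldl (fun g ny => if C nx ny then pvBump g nx.toNat ny.toNat else g) g) g) ∧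
      pvRead (L.foldl (fun g nx => M.foldl (fun g ny => if C nx ny then pvBump g nx.toNat ny.toNat else g) g) g) a b
        = pvRead g a b + (if (a : Int) ∈ L ∧ (b : Int) ∈ M ∧ C (a : Int) (b : Int) then 1 else 0) := by
  induction L with
  | nil => intro _ g hg; exact ⟨hg, by simp⟩
  | cons l L ih =>
    intro hL g hg
    have hlL : l ∉ L := by simp at hL; exact hL.1
    obtain ⟨hstep, hfirst⟩ := pvRead_foldl_inner h w a b M (C l) l
      (fun ny hy => hC l ny hy) ha hb hM g hg
    obtain ⟨hsh, hread⟩ := ih hL.of_cons _ hstep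
    simp only [List.foldl_cons]
    refine ⟨hsh, ?_⟩
    rw [hread, hfirst]
    by_cases hal : (a : Int) = l
    · have hno : (a : Int) ∉ L := by rw [hal]; exact hlL
      have e1 : (if (b : Int) ∈ M ∧ l = (a : Int) ∧ C l (b : Int) then (1:Int) else 0)
          = (if (b : Int) ∈ M ∧ C (a : Int) (b : Int) then 1 else 0) := by simp [← hal]
      have e2 : (if (a : Int) ∈ L ∧ (b : Int) ∈ M ∧ C (a : Int) (b : Int) then (1:Int) else 0) = 0 := by
        simp [hno]
      have e3 : (if (a : Int) ∈ l :: L ∧ (b : Int) ∈ M ∧ C (a : Int) (b : Int) then (1:Int) else 0)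
          = (if (b : Int) ∈ M ∧ C (a : Int) (b : Int) then 1 else 0) := by
        simp [List.mem_cons, hal]
      rw [e1, e2, e3]; ring
    · have e1 : (if (b : Int) ∈ M ∧ l = (a : Int) ∧ C l (b : Int) then (1:Int) else 0) = 0 := by
        rw [if_neg]
        rintro ⟨-, hh, -⟩; exact hal hh.symm
      have e3 : (if (a : Int) ∈ l :: L ∧ (b : Int) ∈ M ∧ C (a : Int) (b : Int) then (1:Int) else 0)
          = (if (a : Int) ∈ L ∧ (b : Int) ∈ M ∧ C (a : Int) (b : Int) then 1 else 0) := by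
        simp [List.mem_cons, hal]
      rw [e1, e3]; ring

lemma pvBumpNbrs_spec (h w : Nat) (x y a b : Nat) (g : List (List Int)) (hg : pvShape h w g)
    (ha : a < h) (hb : b < w) :
    pvShape h w (pvBumpNbrs h w x y g) ∧
    pvRead (pvBumpNbrs h w x y g) a b = pvRead g a b + (if pvAdj x y a b then 1 else 0) := by
  unfold pvBumpNbrs
  obtain ⟨hsh, hread⟩ := pvRead_foldl2 h w a b
    (PySem.List.pyRange ((x : Int) - 1) ((x : Int) + 2) 1)
    (PySem.List.pyRange ((y : Int) - 1) ((y : Int) + 2) 1)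
    (fun nx ny => (¬(nx = (x : Int) ∧ ny = (y : Int))) ∧ 0 ≤ nx ∧ nx < (h : Int) ∧ 0 ≤ ny ∧ ny < (w : Int))
    (PySem.List.nodup_pyRange_one _ _)
    (fun nx ny hc => hc.2) ha hb
    (PySem.List.nodup_pyRange_one _ _) g hg
  refine ⟨hsh, ?_⟩
  rw [hread]
  congr 1
  simp only [PySem.List.mem_pyRange_one, pvAdj, Bool.and_eq_true, Bool.not_eq_true',
    Bool.and_eq_false_iff, decide_eq_true_eq, decide_eq_false_iff_not]
  split_ifs with h1 h2 h2 <;> first | rfl | omega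

lemma pvRead_replicate (h w a b : Nat) :
    pvRead (List.replicate h (List.replicate w (0 : Int))) a b = 0 := by
  simp only [pvRead, List.getD_eq_getElem?_getD, List.getElem?_replicate]
  split_ifs <;> simp [List.getElem?_replicate, apply_ite (fun o : Option Int => o.getD 0)]

lemma pvShape_replicate (h w : Nat) :
    pvShape h w (List.replicate h (List.replicate w (0 : Int))) := by
  constructor
  · simp
  · intro r hr
    rw [List.eq_of_mem_replicate hr]
    simp

lemma pvScatter_row (grid : List (List String)) (a b x : Nat)
    (ha : a < grid.length) (hb : b < (grid.headD []).length) :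
    ∀ (j : Nat) (pq : List (List Int) × List (List Int)),
      pvShape grid.length (grid.headD []).length pq.1 →
      pvShape grid.length (grid.headD []).length pq.2 →
      (pvShape grid.length (grid.headD []).length ((List.range j).foldl (fun (pq : List (List Int) × List (List Int)) y =>
          let v := (grid.getD x []).getD y ""
          if v = "|" then (pvBumpNbrs grid.length (grid.headD []).length x y pq.1, pq.2)
          else if v = "#" then (pq.1, pvBumpNbrs grid.length (grid.headD []).length x y pq.2)
          else pq) pq).1 ∧
       pvShape grid.length (grid.headD []).length ((List.range j).foldl (fun (pq : List (List Int) × List (List Int)) y =>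
          let v := (grid.getD x []).getD y ""
          if v = "|" then (pvBumpNbrs grid.length (grid.headD []).length x y pq.1, pq.2)
          else if v = "#" then (pq.1, pvBumpNbrs grid.length (grid.headD []).length x y pq.2)
          else pq) pq).2) ∧
      pvRead ((List.range j).foldl (fun (pq : List (List Int) × List (List Int)) y =>
          let v := (grid.getD x []).getD y ""
          if v = "|" then (pvBumpNbrs grid.length (grid.headD []).length x y pq.1, pq.2)
          else if v = "#" then (pq.1, pvBumpNbrs grid.length (grid.headD []).length x y pq.2)
          else pq) pq).1 a b
        = pvRead pq.1 a b + ((List.range j).countP (fun y => decide (pvCell grid x y = "|") && pvAdj x y a b) : Int) ∧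
      pvRead ((List.range j).foldl (fun (pq : List (List Int) × List (List Int)) y =>
          let v := (grid.getD x []).getD y ""
          if v = "|" then (pvBumpNbrs grid.length (grid.headD []).length x y pq.1, pq.2)
          else if v = "#" then (pq.1, pvBumpNbrs grid.length (grid.headD []).length x y pq.2)
          else pq) pq).2 a b
        = pvRead pq.2 a b + ((List.range j).countP (fun y => decide (pvCell grid x y = "#") && pvAdj x y a b) : Int) := by
  intro j
  induction j with
  | zero => intro pq h1 h2; exact ⟨⟨h1, h2⟩, by simp, by simp⟩
  | succ j ih =>
    intro pq h1 h2
    obtain ⟨⟨s1, s2⟩, r1, r2⟩ := ih pq h1 h2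
    rw [List.range_succ, List.foldl_append, List.foldl_cons, List.foldl_nil,
        List.countP_append, List.countP_append]
    set pq' := (List.range j).foldl (fun (pq : List (List Int) × List (List Int)) y =>
          let v := (grid.getD x []).getD y ""
          if v = "|" then (pvBumpNbrs grid.length (grid.headD []).length x y pq.1, pq.2)
          else if v = "#" then (pq.1, pvBumpNbrs grid.length (grid.headD []).length x y pq.2)
          else pq) pq with hpq'
    by_cases hv1 : (grid.getD x []).getD j "" = "|"
    · have hstep : (let v := (grid.getD x []).getD j ""
          if v = "|" then (pvBumpNbrs grid.length (grid.headD []).length x j pq'.1, pq'.2)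
          else if v = "#" then (pq'.1, pvBumpNbrs grid.length (grid.headD []).length x j pq'.2)
          else pq') = (pvBumpNbrs grid.length (grid.headD []).length x j pq'.1, pq'.2) := by
        show (if (grid.getD x []).getD j "" = "|" then _ else _) = _
        rw [if_pos hv1]
      rw [hstep]
      obtain ⟨sh1, rd1⟩ := pvBumpNbrs_spec grid.length (grid.headD []).length x j a b pq'.1 s1 ha hb
      have e1 : decide (pvCell grid x j = "|") = true := by
        simp only [pvCell, hv1]; rfl
      have e2 : decide (pvCell grid x j = "#") = false := by
        simp only [pvCell, hv1]; rfl
      refine ⟨⟨sh1, s2⟩, ?_, ?_⟩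
      · show pvRead (pvBumpNbrs grid.length (grid.headD []).length x j pq'.1) a b = _
        rw [rd1, r1]
        cases hadj : pvAdj x j a b <;> simp [hadj, e1] <;> ring
      · show pvRead pq'.2 a b = _
        rw [r2]
        simp [e2]
    · by_cases hv2 : (grid.getD x []).getD j "" = "#"
      · have hstep : (let v := (grid.getD x []).getD j ""
            if v = "|" then (pvBumpNbrs grid.length (grid.headD []).length x j pq'.1, pq'.2)
            else if v = "#" then (pq'.1, pvBumpNbrs grid.length (grid.headD []).length x j pq'.2)
            else pq') = (pq'.1, pvBumpNbrs grid.length (grid.headD []).length x j pq'.2) := by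
          show (if (grid.getD x []).getD j "" = "|" then _ else _) = _
          rw [if_neg hv1, if_pos hv2]
        rw [hstep]
        obtain ⟨sh2, rd2⟩ := pvBumpNbrs_spec grid.length (grid.headD []).length x j a b pq'.2 s2 ha hb
        have e1 : decide (pvCell grid x j = "|") = false := by
          simp only [pvCell, hv2]; rfl
        have e2 : decide (pvCell grid x j = "#") = true := by
          simp only [pvCell, hv2]; rfl
        refine ⟨⟨s1, sh2⟩, ?_, ?_⟩
        · show pvRead pq'.1 a b = _
          rw [r1]
          simp [e1]
        · show pvRead (pvBumpNbrs grid.length (grid.headD []).length x j pq'.2) a b = _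
          rw [rd2, r2]
          cases hadj : pvAdj x j a b <;> simp [hadj, e2] <;> ring
      · have hstep : (let v := (grid.getD x []).getD j ""
            if v = "|" then (pvBumpNbrs grid.length (grid.headD []).length x j pq'.1, pq'.2)
            else if v = "#" then (pq'.1, pvBumpNbrs grid.length (grid.headD []).length x j pq'.2)
            else pq') = pq' := by
          show (if (grid.getD x []).getD j "" = "|" then _ else _) = _
          rw [if_neg hv1, if_neg hv2]
        rw [hstep]
        have e1 : decide (pvCell grid x j = "|") = false := by
          simp only [pvCell]; simpa using hv1
        have e2 : decide (pvCell grid x j = "#") = false := by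
          simp only [pvCell]; simpa using hv2
        exact ⟨⟨s1, s2⟩, by rw [r1]; simp [e1], by rw [r2]; simp [e2]⟩


lemma pvScatter_outer (grid : List (List String)) (a b : Nat)
    (ha : a < grid.length) (hb : b < (grid.headD []).length) :
    ∀ (k : Nat) (pq : List (List Int) × List (List Int)),
      pvShape grid.length (grid.headD []).length pq.1 →
      pvShape grid.length (grid.headD []).length pq.2 →
      (pvShape grid.length (grid.headD []).length ((List.range k).foldl (fun pq x =>
        (List.range (grid.headD []).length).foldl (fun (pq : List (List Int) × List (List Int)) y =>
          let v := (grid.getD x []).getD y ""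
          if v = "|" then (pvBumpNbrs grid.length (grid.headD []).length x y pq.1, pq.2)
          else if v = "#" then (pq.1, pvBumpNbrs grid.length (grid.headD []).length x y pq.2)
          else pq) pq) pq).1 ∧
       pvShape grid.length (grid.headD []).length ((List.range k).foldl (fun pq x =>
        (List.range (grid.headD []).length).foldl (fun (pq : List (List Int) × List (List Int)) y =>
          let v := (grid.getD x []).getD y ""
          if v = "|" then (pvBumpNbrs grid.length (grid.headD []).length x y pq.1, pq.2)
          else if v = "#" then (pq.1, pvBumpNbrs grid.length (grid.headD []).length x y pq.2)
          else pq) pq) pq).2) ∧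
      pvRead ((List.range k).foldl (fun pq x =>
        (List.range (grid.headD []).length).foldl (fun (pq : List (List Int) × List (List Int)) y =>
          let v := (grid.getD x []).getD y ""
          if v = "|" then (pvBumpNbrs grid.length (grid.headD []).length x y pq.1, pq.2)
          else if v = "#" then (pq.1, pvBumpNbrs grid.length (grid.headD []).length x y pq.2)
          else pq) pq) pq).1 a b
        = pvRead pq.1 a b + (pvTotCnt grid "|" a b k (grid.headD []).length : Int) ∧
      pvRead ((List.range k).foldl (fun pq x =>
        (List.range (grid.headD []).length).foldl (fun (pq : List (List Int) × List (List Int)) y =>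
          let v := (grid.getD x []).getD y ""
          if v = "|" then (pvBumpNbrs grid.length (grid.headD []).length x y pq.1, pq.2)
          else if v = "#" then (pq.1, pvBumpNbrs grid.length (grid.headD []).length x y pq.2)
          else pq) pq) pq).2 a b
        = pvRead pq.2 a b + (pvTotCnt grid "#" a b k (grid.headD []).length : Int) := by
  intro k
  induction k with
  | zero => intro pq h1 h2; exact ⟨⟨h1, h2⟩, by simp [pvTotCnt], by simp [pvTotCnt]⟩
  | succ k ih =>
    intro pq h1 h2
    obtain ⟨⟨s1, s2⟩, r1, r2⟩ := ih pq h1 h2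
    rw [List.range_succ, List.foldl_append, List.foldl_cons, List.foldl_nil]
    obtain ⟨⟨t1, t2⟩, q1, q2⟩ := pvScatter_row grid a b k ha hb (grid.headD []).length _ s1 s2
    have tot : ∀ v : String, (pvTotCnt grid v a b (k + 1) (grid.headD []).length : Int)
        = (pvTotCnt grid v a b k (grid.headD []).length : Int) + (pvRowCnt grid v a b k (grid.headD []).length : Int) := by
      intro v
      unfold pvTotCnt
      rw [List.range_succ, List.map_append, List.sum_append]
      push_cast
      simp
    refine ⟨⟨t1, t2⟩, ?_, ?_⟩
    · rw [q1, r1, tot "|"]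
      unfold pvRowCnt
      ring
    · rw [q2, r2, tot "#"]
      unfold pvRowCnt
      ring

lemma pvScatter_read (grid : List (List String)) (a b : Nat)
    (ha : a < grid.length) (hb : b < (grid.headD []).length) :
    (pvShape grid.length (grid.headD []).length (pvScatter grid).1 ∧
     pvShape grid.length (grid.headD []).length (pvScatter grid).2) ∧
    pvRead (pvScatter grid).1 a b = (pvTotCnt grid "|" a b grid.length (grid.headD []).length : Int) ∧
    pvRead (pvScatter grid).2 a b = (pvTotCnt grid "#" a b grid.length (grid.headD []).length : Int) := by
  obtain ⟨⟨t1, t2⟩, q1, q2⟩ := pvScatter_outer grid a b ha hb grid.length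
    (List.replicate grid.length (List.replicate (grid.headD []).length (0 : Int)),
     List.replicate grid.length (List.replicate (grid.headD []).length (0 : Int)))
    (pvShape_replicate _ _) (pvShape_replicate _ _)
  refine ⟨⟨t1, t2⟩, ?_, ?_⟩
  · rw [pvScatter, q1, pvRead_replicate]; ring
  · rw [pvScatter, q2, pvRead_replicate]; ring

lemma pvDirs_mem_bounds (d : Int × Int) (hd : d ∈ pvDirs) :
    -1 ≤ d.1 ∧ d.1 ≤ 1 ∧ -1 ≤ d.2 ∧ d.2 ≤ 1 ∧ ¬(d.1 = 0 ∧ d.2 = 0) := by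
  fin_cases hd <;> norm_num

lemma pvDirs_nodup : pvDirs.Nodup := by decide

lemma pvMem_pvDirs (d : Int × Int) :
    d ∈ pvDirs ↔ (-1 ≤ d.1 ∧ d.1 ≤ 1 ∧ -1 ≤ d.2 ∧ d.2 ≤ 1 ∧ ¬(d.1 = 0 ∧ d.2 = 0)) := by
  constructor
  · exact pvDirs_mem_bounds d
  · intro hcond
    obtain ⟨d1, d2⟩ := d
    simp only [pvDirs, List.mem_cons, List.not_mem_nil, or_false, Prod.mk.injEq]
    simp only at hcond
    omega

lemma pvCountP_eq_card_filter {α : Type} [DecidableEq α] (l : List α) (hl : l.Nodup) (p : α → Bool) :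
    l.countP p = (l.toFinset.filter (fun x => p x)).card := by
  rw [List.countP_eq_length_filter, ← List.toFinset_filter,
    List.toFinset_card_of_nodup (hl.filter p)]

lemma pvCountP_range (n : Nat) (p : Nat → Bool) :
    ((List.range n).countP p : Nat) = ∑ i ∈ Finset.range n, if p i then 1 else 0 := by
  induction n with
  | zero => simp
  | succ n ih =>
    rw [List.range_succ, List.countP_append, Finset.sum_range_succ, ih]
    simp [List.countP_cons]

lemma pvTotCnt_eq_nbrCnt (grid : List (List String)) (v : String) (a b : Nat) :
    pvTotCnt grid v a b grid.length (grid.headD []).length = pvNbrCnt grid v a b := by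
  classical
  -- left side as the card of a filtered product finset
  have lhs_eq : pvTotCnt grid v a b grid.length (grid.headD []).length
      = ((Finset.range grid.length ×ˢ Finset.range (grid.headD []).length).filter
          (fun p : Nat × Nat => decide (pvCell grid p.1 p.2 = v) && pvAdj p.1 p.2 a b)).card := by
    rw [Finset.card_filter, Finset.sum_product]
    unfold pvTotCnt pvRowCnt
    induction grid.length with
    | zero => simp
    | succ k ihk =>
      rw [List.range_succ, List.map_append, List.sum_append, Finset.sum_range_succ, ihk]
      simp only [List.map_cons, List.map_nil, List.sum_cons, List.sum_nil, add_zero]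
      congr 1
      exact pvCountP_range _ _
  rw [lhs_eq]
  -- right side as the card of the filtered direction finset
  have rhs_eq : pvNbrCnt grid v a b
      = (pvDirs.toFinset.filter (fun d : Int × Int =>
          decide (0 ≤ (a : Int) + d.1 ∧ (a : Int) + d.1 < (grid.length : Int) ∧
            0 ≤ (b : Int) + d.2 ∧ (b : Int) + d.2 < (((grid.headD []).length : Int)) ∧
            pvCell grid ((a : Int) + d.1).toNat ((b : Int) + d.2).toNat = v))).card := by
    unfold pvNbrCnt
    exact pvCountP_eq_card_filter pvDirs pvDirs_nodup _
  rw [rhs_eq]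
  apply Finset.card_bij' (fun p _ => (((p : Nat × Nat).1 : Int) - (a : Int), ((p : Nat × Nat).2 : Int) - (b : Int)))
    (fun d _ => ((((a : Int) + (d : Int × Int).1).toNat, ((b : Int) + (d : Int × Int).2).toNat) : Nat × Nat))
  · -- maps into the direction finset
    intro p hp
    simp only [Finset.mem_filter, Finset.mem_product, Finset.mem_range, Bool.and_eq_true,
      decide_eq_true_eq, pvAdj, Bool.not_eq_true', Bool.and_eq_false_iff,
      decide_eq_false_iff_not] at hp
    obtain ⟨⟨hp1, hp2⟩, hcell, hadj⟩ := hp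
    simp only [Finset.mem_filter, List.mem_toFinset, decide_eq_true_eq]
    have hx1 : ((a : Int) + ((p.1 : Int) - (a : Int))).toNat = p.1 := by omega
    have hx2 : ((b : Int) + ((p.2 : Int) - (b : Int))).toNat = p.2 := by omega
    refine ⟨?_, by omega, by omega, by omega, by omega, ?_⟩
    · rw [pvMem_pvDirs]
      omega
    · rw [hx1, hx2]; exact hcell
  · -- maps into the cell finset
    intro d hd
    simp only [Finset.mem_filter, List.mem_toFinset, decide_eq_true_eq] at hd
    obtain ⟨hdmem, hb1, hb2, hb3, hb4, hcell⟩ := hd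
    obtain ⟨e1, e2, e3, e4, e5⟩ := pvDirs_mem_bounds d hdmem
    simp only [Finset.mem_filter, Finset.mem_product, Finset.mem_range, Bool.and_eq_true,
      decide_eq_true_eq, pvAdj, Bool.not_eq_true', Bool.and_eq_false_iff,
      decide_eq_false_iff_not]
    refine ⟨⟨by omega, by omega⟩, hcell, by omega⟩
  · intro p hp
    simp only [Finset.mem_filter, Finset.mem_product, Finset.mem_range] at hp
    obtain ⟨⟨hp1, hp2⟩, -⟩ := hp
    obtain ⟨p1, p2⟩ := p
    simp only at hp1 hp2 ⊢
    rw [Prod.mk.injEq]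
    constructor <;> omega
  · intro d hd
    simp only [Finset.mem_filter, List.mem_toFinset, decide_eq_true_eq] at hd
    obtain ⟨-, hb1, hb2, hb3, hb4, -⟩ := hd
    obtain ⟨d1, d2⟩ := d
    simp only at hb1 hb2 hb3 hb4 ⊢
    rw [Prod.mk.injEq]
    constructor <;> omega

lemma pvGet_adjacent_eq (grid : List (List String)) (a b : Nat) :
    get_adjacent (a : Int) (b : Int) grid
      = ((pvDirs.filter (fun d => decide (0 ≤ (a : Int) + d.1 ∧ (a : Int) + d.1 < (grid.length : Int) ∧
            0 ≤ (b : Int) + d.2 ∧ (b : Int) + d.2 < (((grid.headD []).length : Int))))).map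
          (fun d => (grid.getD ((a : Int) + d.1).toNat []).getD ((b : Int) + d.2).toNat "")) := by
  unfold get_adjacent
  have hfun : (fun (adjacent : List String) (d : Int × Int) =>
      if 0 ≤ (a : Int) + d.1 ∧ (a : Int) + d.1 < (grid.length : Int) ∧
         0 ≤ (b : Int) + d.2 ∧ (b : Int) + d.2 < (((grid.headD []).length : Int)) then
        adjacent ++ [(grid.getD ((a : Int) + d.1).toNat []).getD ((b : Int) + d.2).toNat ""]
      else adjacent)
      = (fun (adjacent : List String) (d : Int × Int) =>
      if (fun d : Int × Int => decide (0 ≤ (a : Int) + d.1 ∧ (a : Int) + d.1 < (grid.length : Int) ∧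
         0 ≤ (b : Int) + d.2 ∧ (b : Int) + d.2 < (((grid.headD []).length : Int)))) d = true then
        adjacent ++ [(fun d : Int × Int => (grid.getD ((a : Int) + d.1).toNat []).getD ((b : Int) + d.2).toNat "") d]
      else adjacent) := by
    funext acc d
    simp only [decide_eq_true_eq]
  rw [hfun, PySem.List.foldl_append_if]
  simp

lemma pvCount_get_adjacent (grid : List (List String)) (v : String) (a b : Nat) :
    (get_adjacent (a : Int) (b : Int) grid).count v = pvNbrCnt grid v a b := by
  rw [pvGet_adjacent_eq, List.count_eq_countP, List.countP_map, List.countP_filter]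
  unfold pvNbrCnt
  apply List.countP_congr
  intro d _
  simp only [Function.comp_apply, Bool.and_eq_true, beq_iff_eq, decide_eq_true_eq, pvCell]
  constructor
  · rintro ⟨hcell, hbounds⟩
    exact ⟨hbounds.1, hbounds.2.1, hbounds.2.2.1, hbounds.2.2.2, hcell⟩
  · rintro ⟨h1, h2, h3, h4, hcell⟩
    exact ⟨hcell, h1, h2, h3, h4⟩

lemma pvGetD_lt {alpha : Type} (l : List alpha) (n : Nat) (d : alpha) (h : n < l.length) :
    l.getD n d = l[n] := by
  simp [List.getD_eq_getElem?_getD, h]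

lemma pvPass_inner (U : Nat → Nat → Option String) (x : Nat) :
    ∀ (j : Nat) (ng : List (List String)),
      (List.range j).foldl (fun ng y => match U x y with | some v => pvSet2 ng x y v | none => ng) ng
        = ng.set x ((ng.getD x []).mapIdx (fun y c => if y < j then (U x y).getD c else c)) := by
  intro j
  induction j with
  | zero =>
    intro ng
    simp only [List.range_zero, List.foldl_nil]
    have hmap : (ng.getD x []).mapIdx (fun y c => if y < 0 then (U x y).getD c else c)
        = ng.getD x [] := by
      apply List.ext_getElem (by simp)
      intro i h1 h2
      simp [List.getElem_mapIdx]
    rw [hmap]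
    by_cases hx : x < ng.length
    · rw [pvGetD_lt _ _ _ hx, List.set_getElem_self]
    · rw [List.set_eq_of_length_le (by omega)]
  | succ j ih =>
    intro ng
    rw [List.range_succ, List.foldl_append, ih, List.foldl_cons, List.foldl_nil]
    by_cases hx : x < ng.length
    · have hrow : ((ng.set x ((ng.getD x []).mapIdx (fun y c => if y < j then (U x y).getD c else c))).getD x [])
          = (ng.getD x []).mapIdx (fun y c => if y < j then (U x y).getD c else c) := by
        rw [pvGetD_lt _ _ _ (by simpa using hx), List.getElem_set_self (by simpa using hx)]
      cases hU : U x j with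
      | some v =>
        show pvSet2 _ x j v = _
        unfold pvSet2
        rw [hrow, List.set_set]
        congr 1
        apply List.ext_getElem (by simp)
        intro i h1 h2
        simp only [List.getElem_set, List.getElem_mapIdx]
        by_cases hij : i = j
        · subst hij
          simp [hU]
        · by_cases hij2 : i < j
          · have e : i < j + 1 := by omega
            simp [Ne.symm hij, hij2, e]
          · have e : ¬ (i < j + 1) := by omega
            simp [Ne.symm hij, hij2, e]
      | none =>
        show ng.set x _ = ng.set x _
        congr 1
        apply List.ext_getElem (by simp)
        intro i h1 h2
        simp only [List.getElem_mapIdx]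
        by_cases hij : i = j
        · subst hij
          simp [hU]
        · by_cases hij2 : i < j
          · have e : i < j + 1 := by omega
            simp [hij2, e]
          · have e : ¬ (i < j + 1) := by omega
            simp [hij2, e]
    · have hset : ∀ r : List String, ng.set x r = ng :=
        fun r => List.set_eq_of_length_le (by omega)
      rw [hset, hset]
      cases hU : U x j with
      | some v =>
        show pvSet2 ng x j v = ng
        unfold pvSet2
        exact hset _
      | none => rfl
lemma pvPass_outer (grid : List (List String)) (w : Nat) (U : Nat → Nat → Option String) :
    ∀ k : Nat,
      (List.range k).foldl (fun ng x =>
        (List.range w).foldl (fun ng y => match U x y with | some v => pvSet2 ng x y v | none => ng) ng) grid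
      = grid.mapIdx (fun x row => if x < k then row.mapIdx (fun y c => if y < w then (U x y).getD c else c) else row) := by
  intro k
  induction k with
  | zero =>
    simp only [List.range_zero, List.foldl_nil]
    apply List.ext_getElem (by simp)
    intro i h1 h2
    simp [List.getElem_mapIdx]
  | succ k ih =>
    rw [List.range_succ, List.foldl_append, ih, List.foldl_cons, List.foldl_nil,
      pvPass_inner U k w]
    by_cases hk : k < grid.length
    · have hrow : ((grid.mapIdx (fun x row => if x < k then row.mapIdx (fun y c => if y < w then (U x y).getD c else c) else row)).getD k [])
          = grid[k] := by
        rw [pvGetD_lt _ _ _ (by simpa using hk), List.getElem_mapIdx]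
        simp
      rw [hrow]
      apply List.ext_getElem (by simp)
      intro i h1 h2
      simp only [List.getElem_set, List.getElem_mapIdx]
      by_cases hik : i = k
      · subst hik
        simp
      · by_cases hik2 : i < k
        · have e : i < k + 1 := by omega
          simp [Ne.symm hik, hik2, e]
        · have e : ¬ (i < k + 1) := by omega
          simp [Ne.symm hik, hik2, e]
    · rw [List.set_eq_of_length_le (by simp; omega)]
      apply List.ext_getElem (by simp)
      intro i h1 h2
      simp only [List.getElem_mapIdx]
      have h3 : i < grid.length := by simpa using h1
      by_cases hik2 : i < k
      · have e : i < k + 1 := by omega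
        simp [hik2, e]
      · have e : ¬ (i < k + 1) := by omega
        simp [hik2, e]
lemma pvNext_eq_pass (grid : List (List String)) :
    next_state grid = pvPass grid (grid.headD []).length (pvUA grid) := by
  unfold next_state pvPass
  congr 1
  funext ng x
  congr 1
  funext ng y
  simp only [pvUA, pvCell]
  split_ifs <;> rfl

lemma pvAlt_eq_pass (grid : List (List String)) (hg : grid ≠ []) :
    next_state_alt grid = pvPass grid (grid.headD []).length (pvUB grid) := by
  unfold next_state_alt
  rw [if_neg hg]
  show (List.range grid.length).foldl _ grid = _
  unfold pvPass
  congr 1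
  funext ng x
  congr 1
  funext ng y
  simp only [pvUB, pvRead, pvScatter, pvCell]
  split_ifs <;> rfl

lemma pvUA_eq_pvUB (grid : List (List String)) (x y : Nat)
    (hx : x < grid.length) (hy : y < (grid.headD []).length) :
    pvUA grid x y = pvUB grid x y := by
  obtain ⟨⟨-, -⟩, q1, q2⟩ := pvScatter_read grid x y hx hy
  unfold pvUA pvUB
  rw [q1, q2, pvTotCnt_eq_nbrCnt grid "|" x y, pvTotCnt_eq_nbrCnt grid "#" x y]
  have c1 : (3 ≤ (get_adjacent (x : Int) (y : Int) grid).count "|")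
      = ((3 : Int) ≤ (pvNbrCnt grid "|" x y : Int)) := by
    rw [pvCount_get_adjacent]
    apply propext; constructor <;> intro <;> omega
  have c2 : (3 ≤ (get_adjacent (x : Int) (y : Int) grid).count "#")
      = ((3 : Int) ≤ (pvNbrCnt grid "#" x y : Int)) := by
    rw [pvCount_get_adjacent]
    apply propext; constructor <;> intro <;> omega
  have c3 : ("#" ∈ get_adjacent (x : Int) (y : Int) grid ∧ "|" ∈ get_adjacent (x : Int) (y : Int) grid)
      = ((1 : Int) ≤ (pvNbrCnt grid "#" x y : Int) ∧ (1 : Int) ≤ (pvNbrCnt grid "|" x y : Int)) := by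
    have m1 : ("#" ∈ get_adjacent (x : Int) (y : Int) grid) ↔ 0 < (get_adjacent (x : Int) (y : Int) grid).count "#" :=
      List.count_pos_iff.symm
    have m2 : ("|" ∈ get_adjacent (x : Int) (y : Int) grid) ↔ 0 < (get_adjacent (x : Int) (y : Int) grid).count "|" :=
      List.count_pos_iff.symm
    rw [pvCount_get_adjacent] at m1 m2
    apply propext
    constructor
    · rintro ⟨ha1, ha2⟩
      exact ⟨by have := m1.1 ha1; omega, by have := m2.1 ha2; omega⟩
    · rintro ⟨ha1, ha2⟩
      exact ⟨m1.2 (by omega), m2.2 (by omega)⟩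
  simp only [c1, c2, c3]


-- ===== VERDICT (by name: the statement is the Claim_ definition above) =====
theorem next_state_spec : Claim_equal_next_state := by
  intro grid _ _
  unfold Spec_next_state
  by_cases hg : grid = []
  · subst hg; rfl
  · rw [pvNext_eq_pass, pvAlt_eq_pass grid hg, pvPass, pvPass, pvPass_outer, pvPass_outer]
    apply List.ext_getElem (by simp)
    intro x h1 h2
    simp only [List.getElem_mapIdx]
    have hx : x < grid.length := by simpa using h1
    simp only [hx, if_pos]
    apply List.ext_getElem (by simp)
    intro y g1 g2
    simp only [List.getElem_mapIdx]
    by_cases hy : y < (grid.headD []).length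
    · simp only [hy, if_pos, pvUA_eq_pvUB grid x y hx hy]
    · simp only [hy, ite_false]
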